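-- pv_equiv track=rewrite | github.com/Alwaysproblem/simplecode | python_Interview/DuplicatedElement.py | FindDuplication
-- ===== SOURCE A (Python) =====
-- def FindDuplication(W):
--     if W == []:
--         return -1
--     HashT = {}
--     for i in W:
--         try:
--             HashT[i] += 1
--         except:
--             HashT[i] = 1
--
--     for i in HashT:
--         if HashT[i] > 1:
--             return i
--
--     return -1
-- ===== SOURCE B (Python) =====
-- def FindDuplication(W):
--     counts = {}
--     for i in W:
--         counts[i] = counts.get(i, 0) + 1
--     dups = {k for k, c in counts.items() if c > 1}
--     for i in W:
--         if i in dups: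
--             return i
--     return -1
-- ===== Notes on version B (the rewrite author's own statement) =====
-- stated objective: alternative
-- what changed: B counts with dict.get instead of try/except, extracts the set of duplicated keys, and scans the ORIGINAL list for the first member of that set, instead of iterating the dict's keys; no special empty-list guard.
import Mathlib
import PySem

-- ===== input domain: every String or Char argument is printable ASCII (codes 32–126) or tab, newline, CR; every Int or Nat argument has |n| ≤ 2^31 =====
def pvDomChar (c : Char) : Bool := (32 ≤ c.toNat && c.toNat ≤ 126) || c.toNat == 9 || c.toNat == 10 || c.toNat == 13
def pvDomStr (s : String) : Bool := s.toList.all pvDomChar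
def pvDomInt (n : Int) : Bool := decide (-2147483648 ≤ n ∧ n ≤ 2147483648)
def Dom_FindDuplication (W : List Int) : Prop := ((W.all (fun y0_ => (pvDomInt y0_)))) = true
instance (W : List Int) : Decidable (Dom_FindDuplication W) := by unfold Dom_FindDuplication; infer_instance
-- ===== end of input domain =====

-- B re-decomposes A: counts via dict.get (no try/except), then the set of duplicated
-- keys, then a first-membership scan over the ORIGINAL list instead of the dict's keys.

-- ===== PORT A =====
-- A's second loop: 'for i in HashT: if HashT[i] > 1: return i' / fall through to -1
-- (iterates the dict's keys; every scanned key is present, so HashT[i] is getD k 0)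
def pvScanKeysA (d : PySem.Dict Int Int) : List Int → Int
  | [] => -1
  | k :: ks => if d.getD k 0 > 1 then k else pvScanKeysA d ks

def FindDuplication (W : List Int) : Int :=
  if W = [] then -1
  else
    -- try: HashT[i] += 1 ; except: HashT[i] = 1
    let hashT := W.foldl (fun d i =>
      match d.get? i with
      | some v => d.insert i (v + 1)
      | none => d.insert i 1) (PySem.Dict.empty : PySem.Dict Int Int)
    pvScanKeysA hashT hashT.keys

-- ===== PORT B =====
-- B's third loop: 'for i in W: if i in dups: return i' / fall through to -1
def pvScanListB (dups : PySem.Set Int) : List Int → Int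
  | [] => -1
  | i :: r => if dups.contains i then i else pvScanListB dups r

def FindDuplication_alt (W : List Int) : Int :=
  let counts := W.foldl (fun d i => d.insert i (d.getD i 0 + 1)) (PySem.Dict.empty : PySem.Dict Int Int)
  let dups := PySem.Set.ofList
    (((counts.items).filter (fun p => p.2 > 1)).map (·.1))
  pvScanListB dups W

-- ===== PRECONDITION & SPEC =====
def Spec_FindDuplication (W : List Int) (out : Int) : Prop := out = FindDuplication_alt W
instance (W : List Int) (out : Int) : Decidable (Spec_FindDuplication W out) := by unfold Spec_FindDuplication; infer_instance

-- ===== CLAIM (what is proved, stated in full; the proofs are below) =====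
def Claim_equal_FindDuplication : Prop := ∀ (W : List Int), Dom_FindDuplication W → Spec_FindDuplication W (FindDuplication W)

-- ===== LEMMAS AND PROOFS =====

-- generic "first element satisfying p, else -1" scan, the common shape of both loops
def pvScan (p : Int → Bool) : List Int → Int
  | [] => -1
  | x :: xs => if p x then x else pvScan p xs

-- A's counting fold is the standard counter fold
theorem pvFoldA_eq_counter (W : List Int) :
    W.foldl (fun d i =>
      match d.get? i with
      | some v => d.insert i (v + 1)
      | none => d.insert i 1) (PySem.Dict.empty : PySem.Dict Int Int) = PySem.Dict.counter W := by
  have h : (fun (d : PySem.Dict Int Int) (i : Int) =>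
      match d.get? i with
      | some v => d.insert i (v + 1)
      | none => d.insert i 1)
      = (fun (d : PySem.Dict Int Int) (i : Int) => d.insert i (d.getD i 0 + 1)) := by
    funext d i
    cases h : d.get? i <;>
      simp [PySem.Dict.getD_eq_get?_getD, h]
  rw [h, PySem.Dict.foldl_insert_getD_add_one_eq_counter]

theorem pvScanKeysA_eq_pvScan (W : List Int) (l : List Int) :
    pvScanKeysA (PySem.Dict.counter W) l
      = pvScan (fun x => decide ((1 : Int) < (W.count x : Int))) l := by
  induction l with
  | nil => rfl
  | cons k ks ih => simp [pvScanKeysA, pvScan, PySem.Dict.getD_counter, ih]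

theorem pvScan_filter_ne (p : Int → Bool) (x : Int) (hpx : p x = false) :
    ∀ s : List Int, pvScan p (List.filter (fun y => !(y == x)) s) = pvScan p s := by
  intro s
  induction s with
  | nil => rfl
  | cons y s ih =>
    by_cases hyx : y = x
    · subst hyx
      simp [pvScan, hpx, ih]
    · have hne : (!(y == x)) = true := by simp [hyx]
      simp [hne, pvScan, ih]

theorem pvScan_ofList (p : Int → Bool) :
    ∀ W : List Int, pvScan p (PySem.Set.ofList W) = pvScan p W := by
  intro W
  induction W with
  | nil => rfl
  | cons x xs ih =>
    rw [PySem.Set.ofList_cons]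
    by_cases hx : p x = true
    · simp [pvScan, hx]
    · have hx' : p x = false := by simpa using hx
      simp only [pvScan, hx', PySem.Set.discard]
      rw [pvScan_filter_ne p x hx', ih]

-- membership in B's dups set, for elements of W
theorem pvContains_dups (W : List Int) (i : Int) (hi : i ∈ W) :
    (PySem.Set.ofList
        ((((PySem.Dict.counter W).items).filter (fun p => p.2 > 1)).map (·.1))).contains i
      = decide ((1 : Int) < (W.count i : Int)) := by
  rw [PySem.Dict.items_counter]
  have hmem : i ∈ PySem.Set.ofList
      ((((PySem.Set.ofList W).map (fun k => (k, (W.count k : Int)))).filter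
        (fun p => p.2 > 1)).map (·.1)) ↔ (1 : Int) < (W.count i : Int) := by
    rw [PySem.Set.mem_ofList]
    simp only [List.mem_map, List.mem_filter, Prod.exists]
    constructor
    · rintro ⟨a, b, ⟨hab, hb⟩, rfl⟩
      obtain ⟨k, hk, hke⟩ := hab
      cases hke
      simpa using hb
    · intro h
      exact ⟨i, (W.count i : Int),
        ⟨by simp [PySem.Set.mem_ofList, hi], by simpa using h⟩, rfl⟩
  by_cases h : (1 : Int) < (W.count i : Int)
  · simp only [h, decide_true]
    exact (PySem.Set.contains_iff _ _).mpr (hmem.mpr h)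
  · simp only [h, decide_false]
    rw [Bool.eq_false_iff]
    intro hc
    exact h (hmem.mp ((PySem.Set.contains_iff _ _).mp hc))

theorem pvScanListB_eq_pvScan (W : List Int) :
    ∀ l : List Int, (∀ i ∈ l, i ∈ W) →
      pvScanListB (PySem.Set.ofList
        ((((PySem.Dict.counter W).items).filter (fun p => p.2 > 1)).map (·.1))) l
        = pvScan (fun x => decide ((1 : Int) < (W.count x : Int))) l := by
  intro l
  induction l with
  | nil => intro _; rfl
  | cons i r ih =>
    intro hsub
    have hi : i ∈ W := hsub i (by simp)
    simp only [pvScanListB, pvScan, pvContains_dups W i hi]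
    rw [ih (fun j hj => hsub j (by simp [hj]))]

-- ===== VERDICT (by name: the statement is the Claim_ definition above) =====
theorem FindDuplication_spec : Claim_equal_FindDuplication := by
  intro W _
  unfold Spec_FindDuplication FindDuplication FindDuplication_alt
  simp only [pvFoldA_eq_counter, PySem.Dict.foldl_insert_getD_add_one_eq_counter]
  rw [pvScanListB_eq_pvScan W W (fun _ h => h)]
  by_cases hW : W = []
  · subst hW; rfl
  · simp only [hW, if_false]
    rw [PySem.Dict.keys_counter, pvScanKeysA_eq_pvScan, pvScan_ofList]
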